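-- pv_equiv track=rewrite | github.com/prashantdomadiya/Mesh_Interpolation | ManifoldLearning_Training.py | getIndexPositions
-- ===== SOURCE A (Python) =====
-- def getIndexPositions(listOfElements,FcsIdx, element):
--     ''' Returns the indexes of all occurrences of give element in
--     the list- listOfElements '''
--     indexPosList = []
--     HalfindexPosList = []
--     indexPos = 0
--     while True:
--         try:
--             # Search for item in list from indexPos to the end of list
--             indexPos = listOfElements.index(element, indexPos)
--             # Add the index position in list
--             indexPosList.append(indexPos)
--             if indexPos in FcsIdx:
--                 HalfindexPosList.append(indexPos)
--
--             indexPos += 1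
--         except ValueError as e:
--             break
--     return indexPosList,HalfindexPosList
-- ===== SOURCE B (Python) =====
-- def getIndexPositions(listOfElements, FcsIdx, element):
--     ''' Returns the indexes of all occurrences of give element in
--     the list- listOfElements '''
--     indexPosList = []
--     HalfindexPosList = []
--     for i, x in enumerate(listOfElements):
--         if x == element:
--             indexPosList.append(i)
--             if i in FcsIdx:
--                 HalfindexPosList.append(i)
--     return indexPosList, HalfindexPosList
-- ===== Notes on version B (the rewrite author's own statement) =====
-- stated objective: idiomatic
-- what changed: Replaced the while-True/try-except repeated list.index find-next pattern by a single enumerate loop that compares each element for equality.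
import Mathlib
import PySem

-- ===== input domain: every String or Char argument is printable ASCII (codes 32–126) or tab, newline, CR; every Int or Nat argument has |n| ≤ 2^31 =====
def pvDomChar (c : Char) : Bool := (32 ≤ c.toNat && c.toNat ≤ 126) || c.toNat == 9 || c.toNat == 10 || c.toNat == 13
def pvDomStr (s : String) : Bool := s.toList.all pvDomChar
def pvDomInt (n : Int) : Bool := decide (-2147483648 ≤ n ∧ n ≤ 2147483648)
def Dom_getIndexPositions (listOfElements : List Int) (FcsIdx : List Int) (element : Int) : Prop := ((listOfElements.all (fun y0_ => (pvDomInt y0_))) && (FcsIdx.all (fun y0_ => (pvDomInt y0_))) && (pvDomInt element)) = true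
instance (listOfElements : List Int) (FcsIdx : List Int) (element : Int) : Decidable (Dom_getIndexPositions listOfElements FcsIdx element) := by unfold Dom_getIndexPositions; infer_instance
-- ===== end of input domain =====

-- B replaces A's while/try/except repeated list.index find-next loop by a single enumerate pass (idiomatic; same cost).


-- ===== PORT A =====
-- A's while-True loop: indexPos = listOfElements.index(element, indexPos) searches the
-- suffix from indexPos (list.index with a start = index? on the dropped prefix, offset back);
-- ValueError (none) breaks the loop.
def pvLoopA (xs FcsIdx : List Int) (element : Int) (pos : Nat)
    (acc half : List Int) : List Int × List Int :=
  match h : PySem.List.index? (xs.drop pos) element with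
  | none => (acc, half)
  | some k =>
      pvLoopA xs FcsIdx element (pos + k + 1) (acc ++ [((pos + k : Nat) : Int)])
        (if ((pos + k : Nat) : Int) ∈ FcsIdx then half ++ [((pos + k : Nat) : Int)] else half)
termination_by xs.length - pos
decreasing_by
  have ⟨hk, _, _⟩ := PySem.List.getElem_of_index?_eq_some h
  simp [List.length_drop] at hk
  omega

def getIndexPositions (listOfElements : List Int) (FcsIdx : List Int) (element : Int) : List Int × List Int :=
  pvLoopA listOfElements FcsIdx element 0 [] []

-- ===== PORT B =====
-- B's for-loop over enumerate, carrying the index i and the two accumulators.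
def pvLoopB (FcsIdx : List Int) (element : Int) (ys : List Int) (i : Nat)
    (acc half : List Int) : List Int × List Int :=
  match ys with
  | [] => (acc, half)
  | x :: t =>
      if x = element then
        pvLoopB FcsIdx element t (i + 1) (acc ++ [(i : Int)])
          (if (i : Int) ∈ FcsIdx then half ++ [(i : Int)] else half)
      else
        pvLoopB FcsIdx element t (i + 1) acc half

def getIndexPositions_alt (listOfElements : List Int) (FcsIdx : List Int) (element : Int) : List Int × List Int :=
  pvLoopB FcsIdx element listOfElements 0 [] []

-- ===== PRECONDITION & SPEC =====
def Spec_getIndexPositions (listOfElements : List Int) (FcsIdx : List Int) (element : Int) (out : List Int × List Int) : Prop := out = getIndexPositions_alt listOfElements FcsIdx element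
instance (listOfElements : List Int) (FcsIdx : List Int) (element : Int) (out : List Int × List Int) : Decidable (Spec_getIndexPositions listOfElements FcsIdx element out) := by unfold Spec_getIndexPositions; infer_instance

-- ===== CLAIM (what is proved, stated in full; the proofs are below) =====
def Claim_equal_getIndexPositions : Prop := ∀ (listOfElements : List Int) (FcsIdx : List Int) (element : Int), Dom_getIndexPositions listOfElements FcsIdx element → Spec_getIndexPositions listOfElements FcsIdx element (getIndexPositions listOfElements FcsIdx element)

-- ===== LEMMAS AND PROOFS =====

-- B's loop skips a block containing no occurrence of element.
theorem pvLoopB_not_mem (FcsIdx : List Int) (element : Int) :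
    ∀ (ys : List Int) (i : Nat) (acc half : List Int), element ∉ ys →
      pvLoopB FcsIdx element ys i acc half = (acc, half) := by
  intro ys
  induction ys with
  | nil => intro i acc half _; rfl
  | cons x t ih =>
      intro i acc half hmem
      simp only [List.mem_cons, not_or] at hmem
      rw [pvLoopB, if_neg (by exact fun h => hmem.1 h.symm)]
      exact ih _ _ _ hmem.2

-- B's loop over an occurrence-free prefix just advances the index.
theorem pvLoopB_append_not_mem (FcsIdx : List Int) (element : Int) :
    ∀ (pre t : List Int) (i : Nat) (acc half : List Int), element ∉ pre →
      pvLoopB FcsIdx element (pre ++ t) i acc half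
        = pvLoopB FcsIdx element t (i + pre.length) acc half := by
  intro pre
  induction pre with
  | nil => intro t i acc half _; simp
  | cons x p ih =>
      intro t i acc half hmem
      simp only [List.mem_cons, not_or] at hmem
      rw [List.cons_append, pvLoopB, if_neg (by exact fun h => hmem.1 h.symm),
        ih _ _ _ _ hmem.2]
      congr 1
      simp; omega

-- Main invariant: A's find-next loop from pos equals B's loop over the suffix xs.drop pos.
theorem pvLoopA_eq_loopB (xs FcsIdx : List Int) (element : Int) :
    ∀ (n pos : Nat) (acc half : List Int), xs.length - pos ≤ n →
      pvLoopA xs FcsIdx element pos acc half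
        = pvLoopB FcsIdx element (xs.drop pos) pos acc half := by
  intro n
  induction n with
  | zero =>
      intro pos acc half hn
      have hdrop : xs.drop pos = [] := List.drop_eq_nil_of_le (by omega)
      rw [pvLoopA]
      split
      · rw [hdrop]; rfl
      · next k heq =>
          have ⟨hk, _, _⟩ := PySem.List.getElem_of_index?_eq_some heq
          rw [hdrop] at hk; simp at hk
  | succ n ih =>
      intro pos acc half hn
      rw [pvLoopA]
      split
      · next heq =>
          rw [PySem.List.index?_eq_none_iff] at heq
          exact (pvLoopB_not_mem FcsIdx element _ pos acc half heq).symm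
      · next k heq =>
          obtain ⟨pre, suf, hsplit, hlen, hpre⟩ := (PySem.List.index?_eq_some_iff _ _ _).mp heq
          have hklen : k < xs.length - pos := by
            have hL := congrArg List.length hsplit
            simp at hL
            omega
          have hsuf : xs.drop (pos + k + 1) = suf := by
            have h1 : xs.drop (pos + k + 1) = (xs.drop pos).drop (k + 1) := by
              rw [List.drop_drop]; congr 1
            have h2 : pre ++ element :: suf = (pre ++ [element]) ++ suf := by simp
            rw [h1, hsplit, h2, List.drop_left' (by simp [hlen])]
          rw [ih (pos + k + 1) _ _ (by omega), hsuf, hsplit,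
            pvLoopB_append_not_mem FcsIdx element pre (element :: suf) pos _ _ hpre,
            hlen, pvLoopB, if_pos rfl]

-- ===== VERDICT (by name: the statement is the Claim_ definition above) =====
theorem getIndexPositions_spec : Claim_equal_getIndexPositions := by
  intro xs FcsIdx element _
  unfold Spec_getIndexPositions getIndexPositions getIndexPositions_alt
  rw [pvLoopA_eq_loopB xs FcsIdx element xs.length 0 [] [] (by omega)]
  simp
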